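-- pv_equiv track=rewrite | github.com/fengidri/wind | pyplugin/better_edit.py | align_fun_with_tag
-- ===== SOURCE A (Python) =====
-- def align_fun_with_tag( lines, tag ):
--     lines = [line.split(tag) for line in lines]
--     max_len = 0
--     for line in lines:
--         max_len = max(max_len, len(line))
--
--     max_len_list = [0] * max_len
--     for line in lines:
--         for i, w in enumerate(line):
--             max_len_list[i] = max(max_len_list[i], len(w))
--     for line in lines:
--         for i, w in enumerate(line):
--             if i == 0:
--                 line[i] = w.rstrip().ljust(max_len_list[i])
--             else:
--                 line[i] = w.strip().ljust(max_len_list[i])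
--     join_tag = " " + tag + ' '
--     lines = [join_tag.join(line).rstrip() for line in lines]
--     return lines
-- ===== SOURCE B (Python) =====
-- def align_fun_with_tag(lines, tag):
--     rows = [line.split(tag) for line in lines]
--     sep = " " + tag + " "
--
--     def cols(rows, first):
--         # recursive column-wise build: pad this column locally, recurse on the tails
--         if all(not r for r in rows):
--             return [""] * len(rows)
--         w = max(len(r[0]) for r in rows if r)
--         tails = cols([r[1:] for r in rows], False)
--         out = []
--         for r, t in zip(rows, tails):
--             if not r:
--                 out.append("")
--             else:
--                 h = (r[0].rstrip() if first else r[0].strip()).ljust(w)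
--                 out.append(h if len(r) == 1 else h + sep + t)
--         return out
--
--     return [s.rstrip() for s in cols(rows, True)]
-- ===== Notes on version B (the rewrite author's own statement) =====
-- stated objective: alternative
-- what changed: B builds the output recursively column by column (pad the current column to its locally-computed raw max width, recurse on the row tails, append separator+tail per row), eliminating A's precomputed width table, its three separate row-wise passes and its per-piece enumerate/index bookkeeping.
-- outside the precondition, e.g. on align_fun_with_tag(['a=b'], ''): A raises ValueError, B raises ValueError
import Mathlib
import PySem

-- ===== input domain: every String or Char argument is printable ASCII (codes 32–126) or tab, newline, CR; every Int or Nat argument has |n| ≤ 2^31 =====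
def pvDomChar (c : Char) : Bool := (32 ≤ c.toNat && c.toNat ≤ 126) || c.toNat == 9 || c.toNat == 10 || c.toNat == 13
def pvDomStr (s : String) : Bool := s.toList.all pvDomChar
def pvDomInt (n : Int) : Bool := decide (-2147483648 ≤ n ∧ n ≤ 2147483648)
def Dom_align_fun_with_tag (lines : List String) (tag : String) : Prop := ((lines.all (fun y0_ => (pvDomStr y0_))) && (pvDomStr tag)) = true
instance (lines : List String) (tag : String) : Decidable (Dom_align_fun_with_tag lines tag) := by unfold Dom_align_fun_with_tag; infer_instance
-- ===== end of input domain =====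

-- B replaces A's two staged passes (precomputed width table, then per-row strip/pad/join) by a
-- single recursion over COLUMNS that pads each column with a locally computed width and
-- concatenates tails (objective: alternative — same cost, different algorithm/decomposition).

-- shared helper: Python's s.ljust(w) (pad with spaces on the right; no-op if w ≤ len(s))
def pyLjust (s : String) (w : Nat) : String :=
  s ++ String.ofList (List.replicate (w - s.toList.length) ' ')

-- ===== PORT A =====
def align_fun_with_tag (lines : List String) (tag : String) : List String :=
  let split : List (List String) := lines.map (fun line => (PySem.Str.split? line tag).getD [])
  let max_len := split.foldl (fun m line => max m line.length) 0
  let mll := split.foldl (fun acc line =>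
      line.zipIdx.foldl (fun acc2 p => acc2.set p.2 (max (acc2.getD p.2 0) p.1.toList.length)) acc)
    (List.replicate max_len 0)
  let split2 := split.map (fun line =>
      line.zipIdx.map (fun p =>
        if p.2 = 0 then pyLjust (PySem.Str.rstrip p.1) (mll.getD p.2 0)
        else pyLjust (PySem.Str.strip p.1) (mll.getD p.2 0)))
  let join_tag := " " ++ tag ++ " "
  split2.map (fun line => PySem.Str.rstrip (PySem.Str.join join_tag line))

-- ===== PORT B =====
-- termination helper for bCols (cited by decreasing_by)
theorem pvTailLen_le (r : List String) : r.tail.length ≤ r.length := by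
  cases r <;> simp

theorem pvTailSum_le (rows : List (List String)) :
    ((rows.map (fun r => r.tail)).map List.length).sum ≤ (rows.map List.length).sum := by
  induction rows with
  | nil => simp
  | cons r rs ih =>
    simp only [List.map_cons, List.sum_cons]
    have := pvTailLen_le r
    omega

theorem pvTailSum_lt (rows : List (List String)) (h : ¬ rows.all (fun r => r.isEmpty) = true) :
    ((rows.map (fun r => r.tail)).map List.length).sum < (rows.map List.length).sum := by
  induction rows with
  | nil => simp at h
  | cons r rs ih =>
    simp only [List.map_cons, List.sum_cons]
    by_cases hr : r.isEmpty = true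
    · have hrs : ¬ rs.all (fun r => r.isEmpty) = true := by
        intro hc; exact h (by simp [hr, hc])
      have := pvTailLen_le r
      have := ih hrs
      omega
    · have h1 : r.tail.length < r.length := by
        cases r with
        | nil => simp at hr
        | cons a t => simp
      have := pvTailSum_le rs
      omega

-- recursive column-wise build: pad this column to its raw max width, recurse on the tails
def bCols (sep : String) (rows : List (List String)) (first : Bool) : List String :=
  if h : rows.all (fun r => r.isEmpty) = true then List.replicate rows.length ""
  else
    let w := ((rows.filterMap (fun r => r.head?)).map (fun s => s.toList.length)).max?.getD 0
    let tails := bCols sep (rows.map (fun r => r.tail)) false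
    (rows.zip tails).map (fun p =>
      match p.1 with
      | [] => ""
      | h0 :: rest =>
        let hs := pyLjust (if first then PySem.Str.rstrip h0 else PySem.Str.strip h0) w
        if rest.isEmpty then hs else hs ++ sep ++ p.2)
termination_by (rows.map List.length).sum
decreasing_by simpa using pvTailSum_lt rows h

def align_fun_with_tag_alt (lines : List String) (tag : String) : List String :=
  let rows : List (List String) := lines.map (fun line => (PySem.Str.split? line tag).getD [])
  let sep := " " ++ tag ++ " "
  (bCols sep rows true).map PySem.Str.rstrip

-- ===== PRECONDITION & SPEC =====
-- Pre_ excludes only tag = "": Python's str.split raises ValueError("empty separator") there (both A and B raise).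
def Pre_align_fun_with_tag (lines : List String) (tag : String) : Prop := tag ≠ ""
instance (lines : List String) (tag : String) : Decidable (Pre_align_fun_with_tag lines tag) := by unfold Pre_align_fun_with_tag; infer_instance
def pvWitness_align_fun_with_tag : List String × String := (["a=b", "cc = d=e"], "=")

def Spec_align_fun_with_tag (lines : List String) (tag : String) (out : List String) : Prop := out = align_fun_with_tag_alt lines tag
instance (lines : List String) (tag : String) (out : List String) : Decidable (Spec_align_fun_with_tag lines tag out) := by unfold Spec_align_fun_with_tag; infer_instance

-- ===== CLAIM (what is proved, stated in full; the proofs are below) =====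
def Claim_equal_align_fun_with_tag : Prop := ∀ (lines : List String) (tag : String), Dom_align_fun_with_tag lines tag → Pre_align_fun_with_tag lines tag → Spec_align_fun_with_tag lines tag (align_fun_with_tag lines tag)

-- ===== LEMMAS AND PROOFS =====

-- the (total) column-width function of a split: max raw length of column j across the rows having one
def colW (rows : List (List String)) (j : Nat) : Nat :=
  ((rows.filter (fun r => decide (j < r.length))).map (fun r => (r.getD j "").toList.length)).max?.getD 0

-- abstract per-row rendering from column j with width function W; fst = "is this column 0"
def renderRow (W : Nat → Nat) (sep : String) : List String → Nat → Bool → String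
  | [], _, _ => ""
  | [p], j, fst => pyLjust (if fst then PySem.Str.rstrip p else PySem.Str.strip p) (W j)
  | p :: q :: rest, j, fst =>
      pyLjust (if fst then PySem.Str.rstrip p else PySem.Str.strip p) (W j) ++ sep ++
        renderRow W sep (q :: rest) (j + 1) false

theorem renderRow_shift (W : Nat → Nat) (sep : String) : ∀ (r : List String) (j : Nat) (fst : Bool),
    renderRow W sep r (j + 1) fst = renderRow (fun k => W (k + 1)) sep r j fst := by
  intro r
  induction r with
  | nil => intros; rfl
  | cons p rest ih =>
    intro j fst
    cases rest with
    | nil => rfl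
    | cons q t => simp only [renderRow, ih (j + 1) false]

theorem renderRow_congr (W1 W2 : Nat → Nat) (sep : String) : ∀ (r : List String) (j : Nat) (fst : Bool),
    (∀ k, j ≤ k → k < j + r.length → W1 k = W2 k) →
    renderRow W1 sep r j fst = renderRow W2 sep r j fst := by
  intro r
  induction r with
  | nil => intros; rfl
  | cons p rest ih =>
    intro j fst hW
    cases rest with
    | nil => simp only [renderRow, hW j le_rfl (by simp)]
    | cons q t =>
      simp only [renderRow, hW j le_rfl (by simp),
        ih (j + 1) false (fun k h1 h2 => hW k (by omega) (by simp at h2 ⊢; omega))]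

theorem colW_tail (rows : List (List String)) (j : Nat) :
    colW (rows.map (fun r => r.tail)) j = colW rows (j + 1) := by
  unfold colW
  congr 1
  congr 1
  induction rows with
  | nil => rfl
  | cons r rs ih =>
    cases r with
    | nil =>
      simp only [List.map_cons, List.tail_nil, List.filter_cons, List.length_nil]
      rw [if_neg (by simp), if_neg (by simp)]
      exact ih
    | cons a t =>
      simp only [List.map_cons, List.tail_cons, List.filter_cons, List.length_cons,
        Nat.add_lt_add_iff_right]
      by_cases hj : j < t.length
      · rw [if_pos (decide_eq_true hj), if_pos (decide_eq_true hj)]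
        simp only [List.map_cons, List.getD_cons_succ, ih]
      · rw [if_neg (by simpa using hj), if_neg (by simpa using hj)]
        exact ih

theorem headW_eq_colW (rows : List (List String)) :
    ((rows.filterMap (fun r => r.head?)).map (fun s => s.toList.length)).max?.getD 0
      = colW rows 0 := by
  unfold colW
  congr 2
  induction rows with
  | nil => rfl
  | cons r rs ih =>
    cases r with
    | nil =>
      simp only [List.filterMap_cons, List.head?_nil, List.filter_cons, List.length_nil]
      rw [if_neg (by simp)]
      exact ih
    | cons a t =>
      simp only [List.filterMap_cons, List.head?_cons, List.filter_cons, List.length_cons]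
      rw [if_pos (by simp)]
      simp only [List.map_cons, List.getD_cons_zero, ih]

theorem zip_map_self {α β γ : Type} (g : List α → β) (F : List α × β → γ) :
    ∀ (l : List (List α)), ((l.zip (l.map g)).map F) = l.map (fun x => F (x, g x)) := by
  intro l
  induction l with
  | nil => rfl
  | cons x xs ih => simp [ih]

theorem bCols_eq (sep : String) : ∀ (n : Nat) (rows : List (List String)) (fst : Bool),
    (rows.map List.length).sum ≤ n →
    bCols sep rows fst = rows.map (fun r => renderRow (colW rows) sep r 0 fst) := by
  intro n
  induction n with
  | zero =>
    intro rows fst hsum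
    have hall : rows.all (fun r => r.isEmpty) = true := by
      simp only [List.all_eq_true]
      intro r hr
      have : r.length ∈ (rows.map List.length) := List.mem_map.2 ⟨r, hr, rfl⟩
      have := List.le_sum_of_mem this
      cases r with
      | nil => rfl
      | cons a t => simp at this; omega
    rw [bCols, dif_pos hall]
    refine (List.eq_replicate_iff.2 ⟨by simp, ?_⟩).symm
    intro b hb
    obtain ⟨r, hr, rfl⟩ := List.mem_map.1 hb
    have : r = [] := by simpa using (List.all_eq_true.1 hall) r hr
    subst this; rfl
  | succ n ih =>
    intro rows fst hsum
    by_cases hall : rows.all (fun r => r.isEmpty) = true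
    · rw [bCols, dif_pos hall]
      refine (List.eq_replicate_iff.2 ⟨by simp, ?_⟩).symm
      intro b hb
      obtain ⟨r, hr, rfl⟩ := List.mem_map.1 hb
      have : r = [] := by simpa using (List.all_eq_true.1 hall) r hr
      subst this; rfl
    · rw [bCols, dif_neg hall]
      have hdec := pvTailSum_lt rows hall
      rw [ih (rows.map (fun r => r.tail)) false (by omega)]
      simp only [List.map_map]
      rw [zip_map_self ((fun r => renderRow (colW (List.map (fun r => r.tail) rows)) sep r 0 false) ∘ (fun r => r.tail))]
      apply List.map_congr_left
      intro r _
      have htails : renderRow (colW (rows.map (fun r => r.tail))) sep r.tail 0 false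
          = renderRow (colW rows) sep r.tail 1 false := by
        rw [renderRow_shift]
        exact renderRow_congr _ _ sep r.tail 0 false (fun k _ _ => colW_tail rows k)
      cases r with
      | nil => rfl
      | cons h0 rest =>
        cases rest with
        | nil =>
          simp only [List.isEmpty_nil, if_pos, renderRow, headW_eq_colW]
        | cons q t =>
          simp only [Function.comp_apply, List.tail_cons] at htails ⊢
          simp only [headW_eq_colW, List.isEmpty_cons, Bool.false_eq_true, if_false, htails,
            renderRow, Nat.zero_add]

-- ===== A-side lemmas (width-table characterisation, reused machinery) =====

theorem pvInner_length (row : List String) : ∀ (n : Nat) (acc : List Nat),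
    ((row.zipIdx n).foldl (fun acc2 p => acc2.set p.2 (max (acc2.getD p.2 0) p.1.toList.length)) acc).length
      = acc.length := by
  induction row with
  | nil => intro n acc; simp
  | cons a l ih =>
    intro n acc
    simp only [List.zipIdx_cons, List.foldl_cons]
    rw [ih]; simp

theorem pvInner_getD (row : List String) : ∀ (n : Nat) (acc : List Nat) (i : Nat),
    n + row.length ≤ acc.length →
    ((row.zipIdx n).foldl (fun acc2 p => acc2.set p.2 (max (acc2.getD p.2 0) p.1.toList.length)) acc).getD i 0
      = if n ≤ i ∧ i < n + row.length
        then max (acc.getD i 0) (row.getD (i - n) "").toList.length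
        else acc.getD i 0 := by
  induction row with
  | nil => intro n acc i h; simp
  | cons a l ih =>
    intro n acc i h
    simp only [List.length_cons] at h ⊢
    simp only [List.zipIdx_cons, List.foldl_cons]
    rw [ih (n+1) _ i (by simp; omega)]
    by_cases h1 : i = n
    · subst h1
      have hlt : i < acc.length := by omega
      rw [if_neg (by omega), if_pos (by omega)]
      simp [List.getD, List.getElem?_set, hlt]
    · have hset : (acc.set n (max (acc.getD n 0) a.toList.length)).getD i 0 = acc.getD i 0 := by
        simp [List.getD, List.getElem?_set, Ne.symm h1]
      by_cases h2 : n + 1 ≤ i ∧ i < n + 1 + l.length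
      · rw [if_pos h2, if_pos (by omega), hset]
        have hidx : i - n = (i - (n+1)) + 1 := by omega
        rw [hidx, List.getD_cons_succ]
      · rw [if_neg h2, if_neg (by omega), hset]

theorem pvOuter_getD (rows : List (List String)) : ∀ (acc : List Nat) (i : Nat),
    (∀ r ∈ rows, r.length ≤ acc.length) →
    (rows.foldl (fun acc line =>
        line.zipIdx.foldl (fun acc2 p => acc2.set p.2 (max (acc2.getD p.2 0) p.1.toList.length)) acc) acc).getD i 0
      = ((rows.filter (fun r => decide (i < r.length))).map
          (fun r => (r.getD i "").toList.length)).foldl max (acc.getD i 0) := by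
  induction rows with
  | nil => intro acc i h; simp
  | cons r rs ih =>
    intro acc i h
    simp only [List.foldl_cons]
    rw [ih _ i (by intro x hx; rw [pvInner_length]; exact h x (List.mem_cons_of_mem _ hx))]
    rw [pvInner_getD r 0 acc i (by simpa using h r (List.mem_cons_self))]
    by_cases hi : i < r.length
    · simp [hi]
    · simp [hi]

theorem pvFoldlMax_eq (l : List Nat) : ∀ (a : Nat), l.foldl max a = max a (l.max?.getD 0) := by
  induction l with
  | nil => intro a; simp
  | cons b l ih =>
    intro a
    simp only [List.foldl_cons]
    rw [ih (max a b)]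
    cases hm : l.max? with
    | none => simp [List.max?_cons, hm, Option.elim] <;> omega
    | some m => simp [List.max?_cons, hm, Option.elim] <;> omega

theorem pvMemLe (l : List Nat) : ∀ (x : Nat) (a : Nat), x ∈ l → x ≤ l.foldl max a := by
  induction l with
  | nil => intro x a h; simp at h
  | cons b l ih =>
    intro x a h
    simp only [List.foldl_cons]
    rcases List.mem_cons.1 h with rfl | h
    · rw [pvFoldlMax_eq]; omega
    · exact ih x _ h

-- A's accumulated width table agrees with colW on every in-row index
theorem mll_eq_colW (split : List (List String)) (i : Nat) (hi : ∃ r ∈ split, i < r.length) :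
    (split.foldl (fun acc line =>
        line.zipIdx.foldl (fun acc2 p => acc2.set p.2 (max (acc2.getD p.2 0) p.1.toList.length)) acc)
      (List.replicate (split.foldl (fun m line => max m line.length) 0) 0)).getD i 0
    = colW split i := by
  obtain ⟨r, hr, hir⟩ := hi
  have hml : split.foldl (fun m line => max m line.length) 0
      = (split.map List.length).foldl max 0 := by rw [List.foldl_map]
  have hrlen : r.length ≤ (split.map List.length).foldl max 0 :=
    pvMemLe _ _ 0 (List.mem_map.2 ⟨r, hr, rfl⟩)
  have hbound : ∀ x ∈ split, x.length ≤ List.length (List.replicate ((split.map List.length).foldl max 0) 0) := by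
    intro x hx
    rw [List.length_replicate]
    exact pvMemLe _ _ 0 (List.mem_map.2 ⟨x, hx, rfl⟩)
  rw [hml, pvOuter_getD split _ i hbound]
  have hrep : (List.replicate ((split.map List.length).foldl max 0) 0).getD i 0 = 0 := by
    simp [List.getD, List.getElem?_replicate, show i < (split.map List.length).foldl max 0 by omega]
  rw [hrep, pvFoldlMax_eq]
  unfold colW
  omega

-- A's per-row pass is renderRow with the width-table function
theorem joinA (W : Nat → Nat) (sep : String) : ∀ (r : List String) (j : Nat),
    PySem.Str.join sep ((r.zipIdx j).map (fun p =>
        if p.2 = 0 then pyLjust (PySem.Str.rstrip p.1) (W p.2)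
        else pyLjust (PySem.Str.strip p.1) (W p.2)))
      = renderRow W sep r j (decide (j = 0)) := by
  intro r
  induction r with
  | nil => intro j; rfl
  | cons p rest ih =>
    intro j
    cases rest with
    | nil =>
      simp only [List.zipIdx_cons, List.zipIdx_nil, List.map_cons, List.map_nil, renderRow]
      have hsingle : ∀ (x : String), PySem.Str.join sep [x] = x := by
        intro x
        apply String.toList_injective
        simp [PySem.Str.join, PySem.Chars.join, List.intercalate]
      by_cases hj : j = 0 <;> simp [hj, hsingle]
    | cons q t =>
      have hjoin : ∀ (a b : String) (l : List String),
          PySem.Str.join sep (a :: b :: l) = a ++ sep ++ PySem.Str.join sep (b :: l) := by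
        intro a b l
        apply String.toList_injective
        simp [PySem.Str.toList_join, PySem.Chars.join_cons_cons]
      simp only [List.zipIdx_cons, List.map_cons]
      rw [hjoin]
      have := ih (j + 1)
      simp only [List.zipIdx_cons, List.map_cons] at this
      rw [this]
      simp only [renderRow]
      by_cases hj : j = 0 <;> simp [hj]

-- ===== VERDICT (by name: the statement is the Claim_ definition above) =====
theorem align_fun_with_tag_spec : Claim_equal_align_fun_with_tag := by
  intro lines tag _ _
  unfold Spec_align_fun_with_tag
  simp only [align_fun_with_tag, align_fun_with_tag_alt]
  generalize List.map (fun line => (PySem.Str.split? line tag).getD []) lines = split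
  rw [bCols_eq (" " ++ tag ++ " ") ((split.map List.length).sum) split true le_rfl]
  simp only [List.map_map]
  apply List.map_congr_left
  intro r hr
  simp only [Function.comp_apply]
  congr 1
  rw [joinA (fun i => (split.foldl (fun acc line =>
      line.zipIdx.foldl (fun acc2 p => acc2.set p.2 (max (acc2.getD p.2 0) p.1.toList.length)) acc)
      (List.replicate (split.foldl (fun m line => max m line.length) 0) 0)).getD i 0) (" " ++ tag ++ " ") r 0]
  have hfst : (decide ((0 : Nat) = 0)) = true := rfl
  rw [hfst]
  refine renderRow_congr _ _ _ r 0 true (fun k hk1 hk2 => ?_)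
  exact mll_eq_colW split k ⟨r, hr, by omega⟩
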